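-- pv_equiv track=rewrite | github.com/EliahKagan/palgoviz | basics/search.py | can_escape_forest
-- ===== SOURCE A (Python) =====
-- def can_escape_forest(forest, stamina, start_i, start_j, finish_i, finish_j):
--     """
--     Check if the tourist can escape the Scary Forest.
--
--     The Scary Forest is a rectangular grid represented as a sequence of strings
--     (rows) in which each square (character) is a tree ('*'), an empty spot of
--     trail ('.'), or a flower whose species is abbreviated by a letter. The
--     tourist starts at coordinates (start_i, start_j) and must get to their
--     rocket ship at (finish_i, finish_j) by moves going north, south, east, or
--     west. The tourist loses a unit of stamina per move, and will sleep forever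
--     when it runs out, except that reaching the rocket ship with zero stamina is
--     okay, because being in a rocket ship is exciting enough to wake anybody up.
--
--     If the tourist walks into a tree, the three swallows up the tourist, who
--     will then live the rest of their life inside the tree. Also, the forest is
--     suspended in an infinite abyss, so to walk out of it is to fall for all
--     eternity. The other matter is that, while the tourist may step on a flower,
--     this makes all flowers of that species angry, and it is a productive anger:
--     they all immediately grow into trees once the tourist takes another step.
--
--     Start and finish locations are guaranteed to be empty spots of trail ('.').
--     Indexing is 0-based and uses matrix conventions: the i-coordinate increases
--     to the south and the j-coordinate increases to the east. Tourists find that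
--     to be the scariest thing of all; that's why they named it the Scary Forest.
--
--     >>> a = ('*A.B',
--     ...      '..*.',
--     ...      '*B.A')
--     >>> can_escape_forest(a, 5, start_i=1, start_j=0, finish_i=1, finish_j=3)
--     True
--     >>> can_escape_forest(a, 4, start_i=1, start_j=0, finish_i=1, finish_j=3)
--     False
--     >>> can_escape_forest(a, 4, start_i=1, start_j=1, finish_i=1, finish_j=3)
--     True
--     >>> b = ('*A.A',
--     ...      '..*.',
--     ...      '*B.B')
--     >>> can_escape_forest(b, 5, start_i=1, start_j=0, finish_i=1, finish_j=3)
--     False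
--     >>> can_escape_forest(b, 10, start_i=1, start_j=0, finish_i=1, finish_j=3)
--     False
--     >>> c = ('.........*..A..',
--     ...      'QQPP*BBAA*.*...',
--     ...      'ABAB*PQRQ*.*.*B',
--     ...      '....*........R.',
--     ...      '****..***.****C',
--     ...      '...*C*....D.P.D',
--     ...      '**.....*C.....D')
--     >>> can_escape_forest(c, 19, start_i=3, start_j=1, finish_i=3, finish_j=14)
--     True
--     >>> can_escape_forest(c, 18, start_i=3, start_j=1, finish_i=3, finish_j=14)
--     False
--     """
--     grid = [list(row) for row in forest]
--     angry_flowers = set()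
--
--     def on_board(i, j):
--         return 0 <= i < len(grid) and 0 <= j < len(grid[i])
--
--     def blocked(i, j):
--         return grid[i][j] == '*' or grid[i][j] in angry_flowers
--
--     def check(i, j, remaining_stamina):
--         if i == finish_i and j == finish_j:
--             return True
--
--         if not on_board(i, j) or blocked(i, j) or remaining_stamina == 0:
--             return False
--
--         if grid[i][j] == '.':
--             grid[i][j] = '*'
--         else:
--             angry_flowers.add(grid[i][j])
--
--         neighbors = ((i, j - 1), (i, j + 1), (i - 1, j), (i + 1, j))
--         result = any(check(h, k, remaining_stamina - 1) for h, k in neighbors)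
--
--         if grid[i][j] == '*':
--             grid[i][j] = '.'
--         else:
--             angry_flowers.remove(grid[i][j])
--
--         return result
--
--     return check(start_i, start_j, stamina)
-- ===== SOURCE B (Python) =====
-- def can_escape_forest(forest, stamina, start_i, start_j, finish_i, finish_j):
--     """Iterative DFS over persistent per-branch states: each stack entry
--     carries its own (immutable) grid and angry-flower set, so no undo step
--     is needed; same checks in the same order as the recursive version."""
--     stack = [(start_i, start_j, stamina, list(forest), frozenset())]
--     while stack:
--         i, j, rs, grid, angry = stack.pop()
--         if i == finish_i and j == finish_j:
--             return True
--         if not (0 <= i < len(grid) and 0 <= j < len(grid[i])):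
--             continue
--         square = grid[i][j]
--         if square == '*' or square in angry or rs == 0:
--             continue
--         if square == '.':
--             row = grid[i]
--             new_grid = grid[:i] + [row[:j] + '*' + row[j + 1:]] + grid[i + 1:]
--             new_angry = angry
--         else:
--             new_grid = grid
--             new_angry = angry | {square}
--         stack.extend((h, k, rs - 1, new_grid, new_angry)
--                      for h, k in ((i, j - 1), (i, j + 1), (i - 1, j), (i + 1, j)))
--     return False
-- ===== Notes on version B (the rewrite author's own statement) =====
-- stated objective: alternative
-- what changed: Replaces A's recursive backtracking (nested closures mutating a shared grid/angry-set and undoing the mark after each subtree) with an iterative DFS over an explicit stack whose entries carry their own persistent (grid, angry-set) snapshots, so there is no recursion and no undo/restore step.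
import Mathlib
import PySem

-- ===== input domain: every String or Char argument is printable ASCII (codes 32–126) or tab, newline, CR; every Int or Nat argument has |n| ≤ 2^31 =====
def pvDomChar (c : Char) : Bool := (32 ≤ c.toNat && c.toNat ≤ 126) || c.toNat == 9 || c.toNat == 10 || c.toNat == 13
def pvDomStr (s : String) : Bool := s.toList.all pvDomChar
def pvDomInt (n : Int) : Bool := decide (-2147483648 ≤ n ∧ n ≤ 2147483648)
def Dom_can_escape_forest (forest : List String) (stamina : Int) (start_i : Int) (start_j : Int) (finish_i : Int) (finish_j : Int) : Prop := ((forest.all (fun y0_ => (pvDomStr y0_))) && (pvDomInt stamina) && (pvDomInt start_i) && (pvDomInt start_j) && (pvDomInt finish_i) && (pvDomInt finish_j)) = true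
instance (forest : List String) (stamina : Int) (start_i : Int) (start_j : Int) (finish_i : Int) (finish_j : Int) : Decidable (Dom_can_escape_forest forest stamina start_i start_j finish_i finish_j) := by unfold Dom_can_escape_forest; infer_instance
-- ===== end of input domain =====

-- B replaces A's recursive backtracking (mutate the shared grid, recurse, undo) by an
-- iterative DFS over an explicit stack whose entries carry their own persistent
-- (grid, angry-set) snapshots, so no undo/restore step exists; same result value.

-- ===== PORT A =====
-- grid[i] / grid[i][j]; in A only evaluated after `on_board` holds, so the defaults are never returned
def pvRowAt (grid : List (List Char)) (i : Int) : List Char := (PySem.List.pyGet? grid i).getD []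
def pvCellAt (grid : List (List Char)) (i j : Int) : Char := (PySem.List.pyGet? (pvRowAt grid i) j).getD ' '

-- Python's nested `on_board` (short-circuit `and` evaluates len(grid[i]) only when 0 <= i < len(grid))
def pvA_on_board (grid : List (List Char)) (i j : Int) : Bool :=
  decide (0 ≤ i) && decide (i < grid.length) && decide (0 ≤ j) && decide (j < (pvRowAt grid i).length)

-- Python's nested `blocked` (only called with on_board true)
def pvA_blocked (grid : List (List Char)) (angry : PySem.Set Char) (i j : Int) : Bool :=
  pvCellAt grid i j == '*' || PySem.Set.contains angry (pvCellAt grid i j)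

-- Python's nested `check`. The fuel argument only makes the recursion structural: a call always
-- marks a free square (or flower species) before recursing, so the measure `pvMeasure` below
-- strictly decreases and with the initial fuel (total squares + 1) the 0-case is never reached.
-- The mutate-then-undo of the Python leaves grid/angry unchanged across the `any`, so the pure
-- port passes the marked state (grid', angry') to each of the four neighbour calls and drops it.
def pvA_check (finish_i finish_j : Int) : Nat → List (List Char) → PySem.Set Char → Int → Int → Int → Bool
  | 0, _, _, _, _, _ => false
  | fuel+1, grid, angry, i, j, rs =>
    if i = finish_i ∧ j = finish_j then true
    else if !pvA_on_board grid i j || pvA_blocked grid angry i j || rs == 0 then false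
    else
      let c := pvCellAt grid i j
      let grid' := if c = '.' then PySem.List.pySetD grid i (PySem.List.pySetD (pvRowAt grid i) j '*') else grid
      let angry' := if c = '.' then angry else PySem.Set.add angry c
      [(i, j-1), (i, j+1), (i-1, j), (i+1, j)].any
        (fun p => pvA_check finish_i finish_j fuel grid' angry' p.1 p.2 (rs - 1))

def can_escape_forest (forest : List String) (stamina : Int) (start_i : Int) (start_j : Int) (finish_i : Int) (finish_j : Int) : Bool :=
  let grid := forest.map (fun row => row.toList)
  pvA_check finish_i finish_j ((grid.map List.length).sum + 1) grid PySem.Set.empty start_i start_j stamina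

-- ===== PORT B =====
-- one stack entry: (i, j, remaining stamina, its own grid, its own angry set); rows as List Char
-- (exact model of the Python row strings: slicing/indexing/concatenation agree on toList).
-- Fuel only makes the loop structural; with the initial fuel 5^(total squares + 1) it never runs out.
def pvB_step (finish_i finish_j : Int) : Nat → List (Int × Int × Int × List (List Char) × PySem.Set Char) → Bool
  | 0, _ => false
  | _+1, [] => false
  | fuel+1, (i, j, rs, grid, angry) :: rest =>
    if i = finish_i ∧ j = finish_j then true
    else if !(decide (0 ≤ i) && decide (i < grid.length) && decide (0 ≤ j) && decide (j < ((PySem.List.pyGet? grid i).getD []).length)) then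
      pvB_step finish_i finish_j fuel rest
    else
      let square := (PySem.List.pyGet? ((PySem.List.pyGet? grid i).getD []) j).getD ' '
      if square == '*' || PySem.Set.contains angry square || rs == 0 then
        pvB_step finish_i finish_j fuel rest
      else
        let row := (PySem.List.pyGet? grid i).getD []
        let new_grid := if square = '.' then
            PySem.List.slice grid none (some i) ++ [PySem.List.slice row none (some j) ++ ['*'] ++ PySem.List.slice row (some (j+1)) none] ++ PySem.List.slice grid (some (i+1)) none
          else grid
        let new_angry := if square = '.' then angry else PySem.Set.add angry square
        -- stack.pop() takes the LAST element: with the list head as stack top, Python's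
        -- extend-then-pop is pushing the generated tasks in reverse onto the front
        pvB_step finish_i finish_j fuel
          ((([(i, j-1), (i, j+1), (i-1, j), (i+1, j)].map (fun p => (p.1, p.2, rs - 1, new_grid, new_angry))).reverse) ++ rest)

def can_escape_forest_alt (forest : List String) (stamina : Int) (start_i : Int) (start_j : Int) (finish_i : Int) (finish_j : Int) : Bool :=
  let grid := forest.map (fun row => row.toList)
  pvB_step finish_i finish_j (5 ^ ((grid.map List.length).sum + 1)) [(start_i, start_j, stamina, grid, PySem.Set.empty)]

-- ===== PRECONDITION & SPEC =====
def Spec_can_escape_forest (forest : List String) (stamina : Int) (start_i : Int) (start_j : Int) (finish_i : Int) (finish_j : Int) (out : Bool) : Prop := out = can_escape_forest_alt forest stamina start_i start_j finish_i finish_j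
instance (forest : List String) (stamina : Int) (start_i : Int) (start_j : Int) (finish_i : Int) (finish_j : Int) (out : Bool) : Decidable (Spec_can_escape_forest forest stamina start_i start_j finish_i finish_j out) := by unfold Spec_can_escape_forest; infer_instance

-- ===== CLAIM (what is proved, stated in full; the proofs are below) =====
def Claim_equal_can_escape_forest : Prop := ∀ (forest : List String) (stamina : Int) (start_i : Int) (start_j : Int) (finish_i : Int) (finish_j : Int), Dom_can_escape_forest forest stamina start_i start_j finish_i finish_j → Spec_can_escape_forest forest stamina start_i start_j finish_i finish_j (can_escape_forest forest stamina start_i start_j finish_i finish_j)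

-- ===== LEMMAS AND PROOFS =====

-- a square is still passable under the angry set
def pvFree (angry : PySem.Set Char) (c : Char) : Bool := !(c == '*') && !(PySem.Set.contains angry c)

-- number of passable squares: the termination measure of A's recursion
def pvMeasure (grid : List (List Char)) (angry : PySem.Set Char) : Nat :=
  (grid.map (fun row => row.countP (pvFree angry))).sum

-- the canonical value of one of B's stack entries, computed by A's recursion with its exact fuel
def pvTaskVal (finish_i finish_j : Int) (t : Int × Int × Int × List (List Char) × PySem.Set Char) : Bool :=
  pvA_check finish_i finish_j (pvMeasure t.2.2.2.1 t.2.2.2.2 + 1) t.2.2.2.1 t.2.2.2.2 t.1 t.2.1 t.2.2.1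

def pvCost (t : Int × Int × Int × List (List Char) × PySem.Set Char) : Nat :=
  5 ^ (1 + pvMeasure t.2.2.2.1 t.2.2.2.2)

lemma pv_decomp {α : Type} (l : List α) (n : Nat) (h : n < l.length) :
    l = l.take n ++ l[n] :: l.drop (n+1) := by
  conv_lhs => rw [← List.take_append_drop n l]
  rw [← List.getElem_cons_drop]

lemma pvMeasure_le_total (grid : List (List Char)) (angry : PySem.Set Char) :
    pvMeasure grid angry ≤ (grid.map List.length).sum := by
  induction grid with
  | nil => simp [pvMeasure]
  | cons r t ih =>
    simp only [pvMeasure, List.map_cons, List.sum_cons] at ih ⊢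
    have := List.countP_le_length (p := pvFree angry) (l := r)
    omega

lemma pv_free_of_free_add (angry : PySem.Set Char) (c a : Char)
    (h : pvFree (PySem.Set.add angry c) a = true) : pvFree angry a = true := by
  simp only [pvFree, Bool.and_eq_true, Bool.not_eq_true'] at h ⊢
  refine ⟨h.1, ?_⟩
  have := h.2
  rw [← Bool.not_eq_true, PySem.Set.contains_iff] at this ⊢
  intro hmem; exact this ((PySem.Set.mem_add _ _ _).mpr (Or.inl hmem))

lemma pv_free_add_self (angry : PySem.Set Char) (c : Char) :
    pvFree (PySem.Set.add angry c) c = false := by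
  have hc : PySem.Set.contains (PySem.Set.add angry c) c = true := by
    rw [PySem.Set.contains_iff]; exact (PySem.Set.mem_add _ _ _).mpr (Or.inr rfl)
  simp only [pvFree, hc, Bool.not_true, Bool.and_false]

lemma pv_row_mark_lt (row : List Char) (m : Nat) (hm : m < row.length) (p : Char → Bool)
    (hp : p row[m] = true) (hstar : p '*' = false) :
    (row.set m '*').countP p < row.countP p := by
  rw [List.set_eq_take_cons_drop '*' hm]
  conv_rhs => rw [pv_decomp row m hm]
  simp only [List.countP_append, List.countP_cons, hp, hstar, Bool.false_eq_true, if_true, if_false]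
  omega

lemma pvMeasure_set_lt (grid : List (List Char)) (angry : PySem.Set Char) (n : Nat)
    (hn : n < grid.length) (r' : List Char)
    (hr : r'.countP (pvFree angry) < grid[n].countP (pvFree angry)) :
    pvMeasure (grid.set n r') angry < pvMeasure grid angry := by
  unfold pvMeasure
  rw [List.map_set, List.set_eq_take_cons_drop _ (by simpa using hn)]
  conv_rhs => rw [pv_decomp (grid.map (fun row => row.countP (pvFree angry))) n (by simpa using hn)]
  simp [List.sum_append]
  omega

lemma pv_row_angry_lt (row : List Char) (m : Nat) (hm : m < row.length) (angry : PySem.Set Char)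
    (c : Char) (hc : row[m] = c) (hfree : pvFree angry c = true) :
    row.countP (pvFree (PySem.Set.add angry c)) < row.countP (pvFree angry) := by
  have mono : ∀ l : List Char, l.countP (pvFree (PySem.Set.add angry c)) ≤ l.countP (pvFree angry) :=
    fun l => List.countP_mono_left (fun a _ ha => pv_free_of_free_add _ _ _ ha)
  conv_lhs => rw [pv_decomp row m hm]
  conv_rhs => rw [pv_decomp row m hm]
  simp only [hc, List.countP_append, List.countP_cons, hfree, pv_free_add_self,
    Bool.false_eq_true, if_true, if_false]
  have := mono (row.take m); have := mono (row.drop (m+1)); omega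

lemma pvMeasure_angry_lt (grid : List (List Char)) (angry : PySem.Set Char) (n m : Nat)
    (hn : n < grid.length) (hm : m < grid[n].length) (c : Char) (hc : grid[n][m] = c)
    (hfree : pvFree angry c = true) :
    pvMeasure grid (PySem.Set.add angry c) < pvMeasure grid angry := by
  have mono : ∀ l : List Char, l.countP (pvFree (PySem.Set.add angry c)) ≤ l.countP (pvFree angry) :=
    fun l => List.countP_mono_left (fun a _ ha => pv_free_of_free_add _ _ _ ha)
  unfold pvMeasure
  conv_lhs => rw [pv_decomp grid n hn]
  conv_rhs => rw [pv_decomp grid n hn]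
  simp only [List.map_append, List.map_cons, List.sum_append, List.sum_cons]
  have h1 := List.sum_le_sum (l := grid.take n)
    (f := fun row => row.countP (pvFree (PySem.Set.add angry c)))
    (g := fun row => row.countP (pvFree angry)) (fun r _ => mono r)
  have h2 := List.sum_le_sum (l := grid.drop (n+1))
    (f := fun row => row.countP (pvFree (PySem.Set.add angry c)))
    (g := fun row => row.countP (pvFree angry)) (fun r _ => mono r)
  have h3 := pv_row_angry_lt grid[n] m hm angry c hc hfree
  omega

lemma pv_rowAt_eq (grid : List (List Char)) (i : Int) (h0 : 0 ≤ i) (hi : i < grid.length) :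
    pvRowAt grid i = grid[i.toNat]'(by omega) := by
  rw [pvRowAt, PySem.List.pyGet?_eq_some_getElem grid h0 hi]; rfl

lemma pv_cellAt_eq (grid : List (List Char)) (i j : Int) (h0 : 0 ≤ i) (hi : i.toNat < grid.length)
    (hj0 : 0 ≤ j) (hj : j.toNat < (grid[i.toNat]'hi).length) :
    pvCellAt grid i j = (grid[i.toNat]'hi)[j.toNat]'hj := by
  have hrow := pv_rowAt_eq grid i h0 (by omega)
  rw [pvCellAt, hrow, PySem.List.pyGet?_eq_some_getElem _ hj0 (by omega)]; rfl

lemma pv_slice_set (grid : List (List Char)) (i j : Int) (h0i : 0 ≤ i) (hi : i < grid.length)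
    (h0j : 0 ≤ j) (hj : j < (pvRowAt grid i).length) :
    PySem.List.slice grid none (some i)
      ++ [PySem.List.slice (pvRowAt grid i) none (some j) ++ ['*'] ++ PySem.List.slice (pvRowAt grid i) (some (j+1)) none]
      ++ PySem.List.slice grid (some (i+1)) none
    = PySem.List.pySetD grid i (PySem.List.pySetD (pvRowAt grid i) j '*') := by
  have hrow := pv_rowAt_eq grid i h0i hi
  rw [PySem.List.slice_to grid h0i, PySem.List.slice_to (pvRowAt grid i) h0j,
    PySem.List.slice_from (pvRowAt grid i) (by omega : (0:Int) ≤ j+1),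
    PySem.List.slice_from grid (by omega : (0:Int) ≤ i+1),
    PySem.List.pySetD_of_nonneg grid _ h0i, PySem.List.pySetD_of_nonneg (pvRowAt grid i) _ h0j]
  have hi1 : (i+1).toNat = i.toNat + 1 := by omega
  have hj1 : (j+1).toNat = j.toNat + 1 := by omega
  rw [hi1, hj1, List.set_eq_take_cons_drop _ (by omega : i.toNat < grid.length),
    List.set_eq_take_cons_drop _ (by omega : j.toNat < (pvRowAt grid i).length)]
  simp

-- entering a valid, unblocked square strictly shrinks the measure, whichever mark is made
lemma pv_mark_lt (grid : List (List Char)) (angry : PySem.Set Char) (i j : Int)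
    (hb : pvA_on_board grid i j = true) (hf : pvFree angry (pvCellAt grid i j) = true) :
    pvMeasure (if pvCellAt grid i j = '.' then PySem.List.pySetD grid i (PySem.List.pySetD (pvRowAt grid i) j '*') else grid)
              (if pvCellAt grid i j = '.' then angry else PySem.Set.add angry (pvCellAt grid i j))
      < pvMeasure grid angry := by
  simp only [pvA_on_board, Bool.and_eq_true, decide_eq_true_eq] at hb
  obtain ⟨⟨⟨h0i, hi⟩, h0j⟩, hj⟩ := hb
  have hrow := pv_rowAt_eq grid i h0i hi
  have hjlt : j.toNat < (grid[i.toNat]'(by omega)).length := by rw [hrow] at hj; omega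
  have hcell := pv_cellAt_eq grid i j h0i (by omega) h0j hjlt
  by_cases hc : pvCellAt grid i j = '.'
  · simp only [hc, if_true]
    rw [PySem.List.pySetD_of_nonneg grid _ h0i, PySem.List.pySetD_of_nonneg (pvRowAt grid i) _ h0j, hrow]
    exact pvMeasure_set_lt grid angry i.toNat (by omega) _
      (pv_row_mark_lt _ j.toNat hjlt (pvFree angry) (by rw [← hcell, hc]; rw [hc] at hf; exact hf) (by simp [pvFree]))
  · simp only [if_neg hc]
    exact pvMeasure_angry_lt grid angry i.toNat j.toNat (by omega) hjlt _ hcell.symm hf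

-- A's recursion does not depend on the fuel once the fuel exceeds the measure
lemma pvA_check_fuel (finish_i finish_j : Int) :
    ∀ (f g : Nat) (grid : List (List Char)) (angry : PySem.Set Char) (i j rs : Int),
      pvMeasure grid angry < f → pvMeasure grid angry < g →
      pvA_check finish_i finish_j f grid angry i j rs = pvA_check finish_i finish_j g grid angry i j rs := by
  intro f
  induction f with
  | zero => intro g grid angry i j rs hf _; omega
  | succ f ih =>
    intro g grid angry i j rs hf hg
    cases g with
    | zero => omega
    | succ g =>
      simp only [pvA_check]
      by_cases h1 : i = finish_i ∧ j = finish_j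
      · simp [h1]
      · simp only [if_neg h1]
        cases h2 : (!pvA_on_board grid i j || pvA_blocked grid angry i j || rs == 0) with
        | true => simp
        | false =>
          simp only [Bool.false_eq_true, if_false]
          simp only [Bool.or_eq_false_iff, Bool.not_eq_false'] at h2
          obtain ⟨⟨hob, hblk⟩, _⟩ := h2
          have hfr : pvFree angry (pvCellAt grid i j) = true := by
            simp only [pvA_blocked, Bool.or_eq_false_iff] at hblk
            unfold pvFree; rw [hblk.1, hblk.2]; rfl
          have hm := pv_mark_lt grid angry i j hob hfr
          have key : ∀ (a b r : Int),
              pvA_check finish_i finish_j f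
                (if pvCellAt grid i j = '.' then PySem.List.pySetD grid i (PySem.List.pySetD (pvRowAt grid i) j '*') else grid)
                (if pvCellAt grid i j = '.' then angry else PySem.Set.add angry (pvCellAt grid i j)) a b r
            = pvA_check finish_i finish_j g
                (if pvCellAt grid i j = '.' then PySem.List.pySetD grid i (PySem.List.pySetD (pvRowAt grid i) j '*') else grid)
                (if pvCellAt grid i j = '.' then angry else PySem.Set.add angry (pvCellAt grid i j)) a b r :=
            fun a b r => ih g _ _ a b r (by omega) (by omega)
          simp only [List.any_cons, List.any_nil, key]

-- B's stack loop computes, for any sufficient fuel, the disjunction of A's value over the stack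
lemma pvB_step_eq_any (finish_i finish_j : Int) :
    ∀ (f : Nat) (stack : List (Int × Int × Int × List (List Char) × PySem.Set Char)),
      (stack.map pvCost).sum ≤ f →
      pvB_step finish_i finish_j f stack = stack.any (pvTaskVal finish_i finish_j) := by
  intro f
  induction f with
  | zero =>
    intro stack h
    cases stack with
    | nil => rfl
    | cons t ts =>
      exfalso
      have : 1 ≤ pvCost t := Nat.one_le_pow _ _ (by norm_num)
      simp only [List.map_cons, List.sum_cons] at h; omega
  | succ f ih =>
    intro stack h
    cases stack with
    | nil => rfl
    | cons t rest =>
      obtain ⟨i, j, rs, grid, angry⟩ := t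
      have hcost : pvCost (i, j, rs, grid, angry) = 5 ^ (1 + pvMeasure grid angry) := rfl
      have hone : 1 ≤ pvCost (i, j, rs, grid, angry) := Nat.one_le_pow _ _ (by norm_num)
      simp only [List.map_cons, List.sum_cons] at h
      have hrest : (rest.map pvCost).sum ≤ f := by omega
      have ihrest := ih rest hrest
      simp only [pvB_step, List.any_cons]
      have htv : pvTaskVal finish_i finish_j (i, j, rs, grid, angry)
          = pvA_check finish_i finish_j (pvMeasure grid angry + 1) grid angry i j rs := rfl
      rw [htv]
      simp only [pvA_check]
      by_cases h1 : i = finish_i ∧ j = finish_j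
      · simp [h1]
      · simp only [if_neg h1]
        have eob : (decide (0 ≤ i) && decide (i < grid.length) && decide (0 ≤ j)
            && decide (j < ((PySem.List.pyGet? grid i).getD []).length)) = pvA_on_board grid i j := rfl
        have ecell : ((PySem.List.pyGet? ((PySem.List.pyGet? grid i).getD []) j).getD ' ') = pvCellAt grid i j := rfl
        rw [eob, ecell]
        cases hob : pvA_on_board grid i j with
        | false => simp [ihrest]
        | true =>
          simp only [Bool.not_true, Bool.false_or]
          have eblk : (pvCellAt grid i j == '*' || PySem.Set.contains angry (pvCellAt grid i j) || rs == 0)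
              = (pvA_blocked grid angry i j || rs == 0) := rfl
          rw [eblk]
          cases hblk : (pvA_blocked grid angry i j || rs == 0) with
          | true => simp [ihrest]
          | false =>
            simp only [Bool.false_eq_true, if_false]
            simp only [Bool.or_eq_false_iff] at hblk
            obtain ⟨hb2, _⟩ := hblk
            have hfr : pvFree angry (pvCellAt grid i j) = true := by
              simp only [pvA_blocked, Bool.or_eq_false_iff] at hb2
              unfold pvFree; rw [hb2.1, hb2.2]; rfl
            have hob4 := hob
            simp only [pvA_on_board, Bool.and_eq_true, decide_eq_true_eq] at hob4
            obtain ⟨⟨⟨h0i, hi⟩, h0j⟩, hj⟩ := hob4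
            have hrowe : ((PySem.List.pyGet? grid i).getD []) = pvRowAt grid i := rfl
            rw [hrowe, pv_slice_set grid i j h0i hi h0j hj]
            have hm := pv_mark_lt grid angry i j hob hfr
            set grid' := if pvCellAt grid i j = '.' then PySem.List.pySetD grid i (PySem.List.pySetD (pvRowAt grid i) j '*') else grid with hg'
            set angry' := if pvCellAt grid i j = '.' then angry else PySem.Set.add angry (pvCellAt grid i j) with ha'
            have hpow1 : 5 ^ (1 + pvMeasure grid' angry') ≤ 5 ^ (pvMeasure grid angry) :=
              Nat.pow_le_pow_right (by norm_num) (by omega)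
            have hpow2 : (5:Nat) ^ (1 + pvMeasure grid angry) = 5 * 5 ^ (pvMeasure grid angry) := by
              rw [Nat.add_comm 1 (pvMeasure grid angry), pow_succ]; ring
            have hpow3 : 1 ≤ (5:Nat) ^ (pvMeasure grid angry) := Nat.one_le_pow _ _ (by norm_num)
            rw [ih ((([(i, j-1), (i, j+1), (i-1, j), (i+1, j)].map
                  (fun p => (p.1, p.2, rs - 1, grid', angry'))).reverse) ++ rest) ?_]
            · simp only [List.any_append, List.any_reverse, List.any_map, List.any_cons, List.any_nil,
                Function.comp]
              have key : ∀ (a b : Int),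
                  pvTaskVal finish_i finish_j (a, b, rs - 1, grid', angry')
                  = pvA_check finish_i finish_j (pvMeasure grid angry) grid' angry' a b (rs - 1) := by
                intro a b
                show pvA_check finish_i finish_j (pvMeasure grid' angry' + 1) grid' angry' a b (rs - 1) = _
                exact pvA_check_fuel finish_i finish_j _ _ _ _ a b (rs-1) (by omega) (by omega)
              simp only [key]
            · simp only [List.map_append, List.map_reverse, List.sum_append, List.sum_reverse,
                List.map_cons, List.map_nil, List.sum_cons, List.sum_nil]
              have hce : ∀ (a b : Int), pvCost (a, b, rs - 1, grid', angry') = 5 ^ (1 + pvMeasure grid' angry') :=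
                fun _ _ => rfl
              simp only [hce]
              rw [hcost, hpow2] at h
              omega

-- ===== VERDICT (by name: the statement is the Claim_ definition above) =====
theorem can_escape_forest_spec : Claim_equal_can_escape_forest := by
  intro forest stamina si sj fi fj _
  unfold Spec_can_escape_forest can_escape_forest can_escape_forest_alt
  set grid := forest.map (fun row => row.toList) with hgrid
  have htot := pvMeasure_le_total grid PySem.Set.empty
  rw [pvB_step_eq_any fi fj _ _ (by
    simp only [List.map_cons, List.map_nil, List.sum_cons, List.sum_nil, Nat.add_zero]
    calc pvCost (si, sj, stamina, grid, PySem.Set.empty)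
        = 5 ^ (1 + pvMeasure grid PySem.Set.empty) := rfl
      _ ≤ 5 ^ ((grid.map List.length).sum + 1) :=
          Nat.pow_le_pow_right (by norm_num) (by omega))]
  simp only [List.any_cons, List.any_nil, Bool.or_false]
  show pvA_check fi fj ((grid.map List.length).sum + 1) grid PySem.Set.empty si sj stamina
      = pvA_check fi fj (pvMeasure grid PySem.Set.empty + 1) grid PySem.Set.empty si sj stamina
  exact pvA_check_fuel fi fj _ _ _ _ _ _ _ (by omega) (by omega)
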